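-- pv_equiv track=rewrite | github.com/kimotot/pe | py37.py | leftcut
-- ===== SOURCE A (Python) =====
-- def leftcut(n):
--     '''引数を左から切り詰めた数字をリスト形式で返す関数'''
--
--     keta = 0
--     t = n
--
--     while t > 0:
--         keta += 1
--         t = t // 10
--
--     ans = set()
--     t = n
--     keta -= 1
--     while keta > 0:
--         n = n % 10**keta
--         ans.add(n)
--         keta -= 1
--
--     r = list(ans)
--     r.sort()
--     return r
-- ===== SOURCE B (Python) =====
-- def leftcut(n):
--     '''引数を左から切り詰めた数字をリスト形式で返す関数'''
--     # Left-truncations n % 10, n % 100, ... are nondecreasing, so emit them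
--     # in order and skip adjacent duplicates: no set and no sort needed.
--     out = []
--     p = 10
--     while p <= n:
--         v = n % p
--         if not out or out[-1] != v:
--             out.append(v)
--         p *= 10
--     return out
-- ===== Notes on version B (the rewrite author's own statement) =====
-- stated objective: simpler
-- what changed: Replaces A's digit-count loop plus set-building mod loop plus sort by a single loop over growing powers of ten that emits the truncations, which are provably nondecreasing, in sorted order with adjacent deduplication (no set, no sort).
import Mathlib
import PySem

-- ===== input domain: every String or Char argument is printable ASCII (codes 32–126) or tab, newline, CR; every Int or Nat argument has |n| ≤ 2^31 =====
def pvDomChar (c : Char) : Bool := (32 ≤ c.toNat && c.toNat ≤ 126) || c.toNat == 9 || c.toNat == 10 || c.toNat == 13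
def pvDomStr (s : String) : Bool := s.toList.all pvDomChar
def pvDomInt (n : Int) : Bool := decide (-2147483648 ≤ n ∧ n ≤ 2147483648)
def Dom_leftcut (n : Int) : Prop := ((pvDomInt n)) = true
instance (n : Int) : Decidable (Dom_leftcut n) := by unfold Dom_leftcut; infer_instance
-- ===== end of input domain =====

-- B replaces A's digit-count + set + sort by one loop emitting the (nondecreasing) truncations in order with adjacent dedup; objective: simpler.


-- ===== PORT A =====
-- while t > 0: keta += 1; t = t // 10
def leftcutKeta (keta t : Int) : Int :=
  if h : 0 < t then leftcutKeta (keta + 1) (PySem.Int.floordiv t 10) else keta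
termination_by t.toNat
decreasing_by
  rw [PySem.Int.floordiv_eq_ediv_of_pos (by norm_num : (0:Int) < 10)]
  omega

-- while keta > 0: n = n % 10**keta; ans.add(n); keta -= 1
-- (10 ** keta is ported as 10 ^ keta.toNat — exact, since the loop body runs only with keta > 0)
def leftcutLoop (n : Int) (ans : PySem.Set Int) (keta : Int) : PySem.Set Int :=
  if h : 0 < keta then
    let n' := PySem.Int.mod n ((10:Int) ^ keta.toNat)
    leftcutLoop n' (PySem.Set.add ans n') (keta - 1)
  else ans
termination_by keta.toNat
decreasing_by omega

def leftcut (n : Int) : List Int :=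
  let keta := leftcutKeta 0 n
  let ans := leftcutLoop n PySem.Set.empty (keta - 1)
  PySem.List.sorted ans (fun x => x) false

-- ===== PORT B =====
-- while p <= n: v = n % p; (append v unless it equals out[-1]); p *= 10
-- ('0 < p' is a totality guard only: B always calls this with p ≥ 10 > 0)
def leftcutAltLoop (n p : Int) (out : List Int) : List Int :=
  if hp : 0 < p ∧ p ≤ n then
    leftcutAltLoop n (p * 10)
      (if out = [] ∨ out.getLast? ≠ some (PySem.Int.mod n p) then
        out ++ [PySem.Int.mod n p] else out)
  else out
termination_by (n + 1 - p).toNat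
decreasing_by omega

def leftcut_alt (n : Int) : List Int :=
  leftcutAltLoop n 10 []

-- ===== PRECONDITION & SPEC =====
def Spec_leftcut (n : Int) (out : List Int) : Prop := out = leftcut_alt n
instance (n : Int) (out : List Int) : Decidable (Spec_leftcut n out) := by unfold Spec_leftcut; infer_instance

-- ===== CLAIM (what is proved, stated in full; the proofs are below) =====
def Claim_equal_leftcut : Prop := ∀ (n : Int), Dom_leftcut n → Spec_leftcut n (leftcut n)

-- ===== LEMMAS AND PROOFS =====

-- the j-digit left-truncation of n (proof-side abbreviation)
def pvM (n : Int) (j : Nat) : Int := n % (10:Int) ^ j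

lemma pvM_emod_le_self (a b : Int) (h : 0 ≤ a) (hb : 0 < b) : a % b ≤ a := by
  rcases (by omega : b ≤ a ∨ a < b) with hba | hba
  · have := Int.emod_lt_of_pos a hb; omega
  · rw [Int.emod_eq_of_lt h hba]

lemma pvM_of_pvM (n : Int) {j j' : Nat} (h : j ≤ j') : pvM (pvM n j') j = pvM n j :=
  Int.emod_emod_of_dvd n (pow_dvd_pow 10 h)

lemma pvM_mono (n : Int) {j j' : Nat} (h : j ≤ j') : pvM n j ≤ pvM n j' := by
  rw [← pvM_of_pvM n h]
  exact pvM_emod_le_self _ _ (Int.emod_nonneg n (by positivity)) (by positivity)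

lemma keta_shift (t keta : Int) : leftcutKeta keta t = keta + leftcutKeta 0 t := by
  induction ht : t.toNat using Nat.strong_induction_on generalizing t keta with
  | _ m ih =>
    by_cases h : 0 < t
    · rw [leftcutKeta, dif_pos h]
      conv_rhs => rw [leftcutKeta, dif_pos h]
      have hfd : PySem.Int.floordiv t 10 = t / 10 :=
        PySem.Int.floordiv_eq_ediv_of_pos (by norm_num)
      have hlt : (PySem.Int.floordiv t 10).toNat < m := by rw [hfd]; omega
      rw [ih _ hlt _ (keta + 1) rfl, ih _ hlt _ (0 + 1) rfl]
      ring
    · rw [leftcutKeta, dif_neg h]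
      conv_rhs => rw [leftcutKeta, dif_neg h]
      ring

lemma keta_nonpos (t : Int) (h : t ≤ 0) : leftcutKeta 0 t = 0 := by
  rw [leftcutKeta]
  simp [show ¬ (0 < t) by omega]

lemma keta_bounds (t : Int) (h : 0 < t) :
    1 ≤ leftcutKeta 0 t ∧
    (10:Int) ^ ((leftcutKeta 0 t).toNat - 1) ≤ t ∧ t < (10:Int) ^ (leftcutKeta 0 t).toNat := by
  induction ht : t.toNat using Nat.strong_induction_on generalizing t with
  | _ m ih =>
    rw [leftcutKeta]
    simp only [h, dite_true]
    rw [keta_shift]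
    have hfd : PySem.Int.floordiv t 10 = t / 10 :=
      PySem.Int.floordiv_eq_ediv_of_pos (by norm_num)
    by_cases h' : 0 < PySem.Int.floordiv t 10
    · have hlt : (PySem.Int.floordiv t 10).toNat < m := by rw [hfd]; omega
      obtain ⟨h1, h2, h3⟩ := ih _ hlt _ h' rfl
      set K := leftcutKeta 0 (PySem.Int.floordiv t 10) with hK
      have htn : ((0:Int) + 1 + K).toNat = K.toNat + 1 := by omega
      refine ⟨by omega, ?_, ?_⟩
      · rw [htn]
        have hsucc : (10:Int) ^ (K.toNat + 1 - 1) = 10 ^ (K.toNat - 1) * 10 := by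
          rw [← pow_succ]; congr 1; omega
        rw [hsucc]
        set c := (10:Int) ^ (K.toNat - 1) with hc
        rw [hfd] at h2
        omega
      · rw [htn, pow_succ]
        set c := (10:Int) ^ K.toNat with hc
        rw [hfd] at h3
        omega
    · rw [keta_nonpos _ (by omega)]
      rw [hfd] at h'
      norm_num
      omega

lemma loop_mem (n : Int) : ∀ (k : Nat) (m : Int) (s : PySem.Set Int),
    (∀ j : Nat, j ≤ k → pvM m j = pvM n j) →
    ∀ x, x ∈ leftcutLoop m s (k : Int) ↔ x ∈ s ∨ ∃ j : Nat, 1 ≤ j ∧ j ≤ k ∧ x = pvM n j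
  | 0, m, s, hinv, x => by
    rw [leftcutLoop]
    simp
  | (k+1), m, s, hinv, x => by
    rw [leftcutLoop]
    have hpos : (0:Int) < ((k+1 : Nat) : Int) := by positivity
    rw [dif_pos hpos]
    have htn : (((k+1 : Nat) : Int)).toNat = k + 1 := by omega
    have hsub : ((k+1 : Nat) : Int) - 1 = ((k : Nat) : Int) := by push_cast; ring
    have hm : PySem.Int.mod m ((10:Int) ^ (((k+1 : Nat) : Int)).toNat) = pvM n (k+1) := by
      rw [htn, PySem.Int.mod_eq_emod_of_pos (by positivity)]
      exact hinv (k+1) le_rfl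
    simp only [hm, hsub]
    rw [loop_mem n k (pvM n (k+1)) (PySem.Set.add s (pvM n (k+1)))
      (fun j hj => pvM_of_pvM n (by omega : j ≤ k+1)) x]
    rw [PySem.Set.mem_add]
    constructor
    · rintro (⟨hx | hx⟩ | ⟨j, h1, h2, h3⟩)
      · exact Or.inl hx
      · exact Or.inr ⟨k+1, by omega, le_rfl, hx⟩
      · exact Or.inr ⟨j, h1, by omega, h3⟩
    · rintro (hx | ⟨j, h1, h2, h3⟩)
      · exact Or.inl (Or.inl hx)
      · rcases (by omega : j ≤ k ∨ j = k + 1) with hj | hj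
        · exact Or.inr ⟨j, h1, hj, h3⟩
        · subst hj; exact Or.inl (Or.inr h3)

lemma loop_nodup : ∀ (k : Nat) (m : Int) (s : PySem.Set Int),
    s.Nodup → (leftcutLoop m s (k : Int)).Nodup
  | 0, m, s, hs => by
    rw [leftcutLoop]
    simpa using hs
  | (k+1), m, s, hs => by
    rw [leftcutLoop]
    have hpos : (0:Int) < ((k+1 : Nat) : Int) := by positivity
    rw [dif_pos hpos]
    have hsub : ((k+1 : Nat) : Int) - 1 = ((k : Nat) : Int) := by push_cast; ring
    rw [hsub]
    exact loop_nodup k _ _ (PySem.Set.nodup_add s _ hs)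

lemma altLoop_spec (n : Int) : ∀ (k : Nat) (out : List Int), 1 ≤ k →
    (k = 1 ∨ (10:Int) ^ (k - 1) ≤ n) →
    (∀ x, x ∈ out ↔ ∃ j : Nat, 1 ≤ j ∧ j < k ∧ x = pvM n j) →
    out.Pairwise (· < ·) →
    (out.getLast? = some (pvM n (k - 1)) ∨ (k = 1 ∧ out = [])) →
    (leftcutAltLoop n ((10:Int) ^ k) out).Pairwise (· < ·) ∧
    (∀ x, x ∈ leftcutAltLoop n ((10:Int) ^ k) out ↔
      ∃ j : Nat, 1 ≤ j ∧ (10:Int) ^ j ≤ n ∧ x = pvM n j) := by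
  intro k
  induction hmeas : n.toNat + 1 - k using Nat.strong_induction_on generalizing k with
  | _ m ih =>
    intro out hk hkn hmem hpair hlast
    rw [leftcutAltLoop]
    by_cases hle : (10:Int) ^ k ≤ n
    · have hpow : (0:Int) < 10 ^ k := by positivity
      rw [dif_pos ⟨hpow, hle⟩]
      have hklt : (k : Int) < 10 ^ k := by
        have := Nat.lt_pow_self (by norm_num : 1 < 10) (n := k)
        exact_mod_cast this
      have hmlt : n.toNat + 1 - (k + 1) < m := by omega
      have hv : PySem.Int.mod n ((10:Int) ^ k) = pvM n k := by
        rw [PySem.Int.mod_eq_emod_of_pos hpow]; rfl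
      have hstep : (10:Int) ^ k * 10 = 10 ^ (k + 1) := by rw [pow_succ]
      by_cases hk1 : k = 1
      · subst hk1
        have hout : out = [] := by
          refine List.eq_nil_iff_forall_not_mem.mpr (fun x hx => ?_)
          obtain ⟨j, h1, h2, _⟩ := (hmem x).mp hx
          omega
        subst hout
        simp only [hv, hstep, List.nil_append]
        exact ih _ hmlt (1+1) rfl [pvM n 1] (by omega) (Or.inr (by simpa using hle))
          (fun x => by
            simp only [List.mem_singleton]
            constructor
            · rintro rfl; exact ⟨1, le_rfl, by omega, rfl⟩
            · rintro ⟨j, h1, h2, rfl⟩; have : j = 1 := by omega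
              rw [this])
          (List.pairwise_singleton _ _)
          (Or.inl (by simp))
      · have hk2 : 2 ≤ k := by omega
        rcases hlast with hlast | ⟨h1, _⟩
        · have hne : out ≠ [] := by
            intro hnil; rw [hnil] at hlast; simp at hlast
          by_cases heq : pvM n (k-1) = pvM n k
          · have hcond : ¬ (out = [] ∨ out.getLast? ≠ some (PySem.Int.mod n ((10:Int) ^ k))) := by
              rintro (hcontra | hcontra)
              · exact hne hcontra
              · exact hcontra (by rw [hv, hlast, heq])
            rw [if_neg hcond, hstep]
            exact ih _ hmlt (k+1) rfl out (by omega)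
              (Or.inr (by simpa using hle))
              (fun x => by
                rw [hmem x]
                constructor
                · rintro ⟨j, h1, h2, h3⟩; exact ⟨j, h1, by omega, h3⟩
                · rintro ⟨j, h1, h2, h3⟩
                  rcases (by omega : j < k ∨ j = k) with hj | hj
                  · exact ⟨j, h1, hj, h3⟩
                  · exact ⟨k-1, by omega, by omega, by rw [h3, hj, heq]⟩)
              hpair
              (Or.inl (by rw [hlast, heq]; norm_num))
          · have hlt : pvM n (k-1) < pvM n k :=
              lt_of_le_of_ne (pvM_mono n (by omega)) heq
            have hcond : out = [] ∨ out.getLast? ≠ some (PySem.Int.mod n ((10:Int) ^ k)) := by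
              refine Or.inr ?_
              rw [hv, hlast]
              intro hcontra
              exact absurd (Option.some.inj hcontra) (ne_of_lt hlt)
            rw [if_pos hcond, hv, hstep]
            refine ih _ hmlt (k+1) rfl (out ++ [pvM n k]) (by omega)
              (Or.inr (by simpa using hle))
              (fun x => by
                simp only [List.mem_append, List.mem_singleton, hmem x]
                constructor
                · rintro (⟨j, h1, h2, h3⟩ | rfl)
                  · exact ⟨j, h1, by omega, h3⟩
                  · exact ⟨k, by omega, by omega, rfl⟩
                · rintro ⟨j, h1, h2, h3⟩
                  rcases (by omega : j < k ∨ j = k) with hj | hj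
                  · exact Or.inl ⟨j, h1, hj, h3⟩
                  · subst hj; exact Or.inr h3)
              ?_ (Or.inl (by rw [List.getLast?_concat]; norm_num))
            rw [List.pairwise_append]
            refine ⟨hpair, List.pairwise_singleton _ _, fun x hx y hy => ?_⟩
            rw [List.mem_singleton] at hy
            subst hy
            obtain ⟨j, h1, h2, h3⟩ := (hmem x).mp hx
            calc x = pvM n j := h3
              _ ≤ pvM n (k-1) := pvM_mono n (by omega)
              _ < pvM n k := hlt
        · omega
    · rw [dif_neg (fun hc => hle hc.2)]
      refine ⟨hpair, fun x => ?_⟩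
      rw [hmem x]
      constructor
      · rintro ⟨j, h1, h2, h3⟩
        rcases hkn with rfl | hkn
        · omega
        · exact ⟨j, h1, le_trans (pow_le_pow_right₀ (by norm_num) (by omega)) hkn, h3⟩
      · rintro ⟨j, h1, h2, h3⟩
        refine ⟨j, h1, ?_, h3⟩
        by_contra hjk
        exact hle (le_trans (pow_le_pow_right₀ (by norm_num) (by omega)) h2)

-- ===== VERDICT (by name: the statement is the Claim_ definition above) =====
theorem leftcut_spec : Claim_equal_leftcut := by
  unfold Claim_equal_leftcut Spec_leftcut
  intro n _
  show PySem.List.sorted (leftcutLoop n PySem.Set.empty (leftcutKeta 0 n - 1)) (fun x => x) false =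
    leftcutAltLoop n 10 []
  by_cases hn : 0 < n
  · obtain ⟨h1, h2, h3⟩ := keta_bounds n hn
    have hcast : leftcutKeta 0 n - 1 = (((leftcutKeta 0 n).toNat - 1 : Nat) : Int) := by omega
    rw [hcast]
    set K := (leftcutKeta 0 n).toNat - 1 with hK
    have hS := loop_mem n K n PySem.Set.empty (fun j _ => rfl)
    have hSnd := loop_nodup K n PySem.Set.empty (by simp [PySem.Set.empty])
    have hB := altLoop_spec n 1 [] le_rfl (Or.inl rfl)
      (fun x => by simp) (List.Pairwise.nil) (Or.inr ⟨rfl, rfl⟩)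
    obtain ⟨hBp, hBm⟩ := hB
    rw [show (10:Int) = 10 ^ 1 by norm_num]
    refine PySem.List.sorted_eq_of_perm_of_pairwise_lt _ _ _ ?_ hBp
    rw [List.perm_ext_iff_of_nodup (hBp.imp ne_of_lt) hSnd]
    intro x
    rw [hBm x, hS x]
    simp only [PySem.Set.empty, List.not_mem_nil, false_or]
    constructor
    · rintro ⟨j, hj1, hj2, hj3⟩
      refine ⟨j, hj1, ?_, hj3⟩
      have hjlt : (10:Int) ^ j < 10 ^ (leftcutKeta 0 n).toNat := lt_of_le_of_lt hj2 h3
      by_contra hjk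
      exact absurd (pow_le_pow_right₀ (by norm_num : (1:Int) ≤ 10) (by omega : (leftcutKeta 0 n).toNat ≤ j)) (not_le.mpr hjlt)
    · rintro ⟨j, hj1, hj2, hj3⟩
      exact ⟨j, hj1, le_trans (pow_le_pow_right₀ (by norm_num) (by omega : j ≤ (leftcutKeta 0 n).toNat - 1)) h2, hj3⟩
  · rw [keta_nonpos n (by omega)]
    rw [leftcutLoop]
    rw [dif_neg (by norm_num)]
    rw [leftcutAltLoop]
    rw [dif_neg (by omega)]
    rfl
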